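-- pv_equiv track=rewrite | github.com/DmitryInd/project_Quest | Main.py | changer_names
-- ===== SOURCE A (Python) =====
-- def changer_names(expression, inventory):
--     """Replaces names with numbers"""
--     i = 0
--     s = ""
--     while i < len(expression):
--         if (expression[i] == "\"" and s == "") or (s != ""
--                                                    and expression[i] != "\""):
--             s += expression[i]
--         elif expression[i] == "\"" and s != "":
--             s = s[1:]
--             k = inventory["Visible"].get(s, None)
--             obj = inventory["Visible"]
--             if k is None:
--                 k = inventory["Not visible"].get(s, None)
--                 obj = inventory["Not visible"]
--                 if k is None:
--                     k = inventory["Always visible"].get(s, None)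
--                     obj = inventory["Always visible"]
--                     if k is None:
--                         raise Exception(s + 'does not exist')
--             obj = obj[s]
--             expression = expression[: i - len(s) - 1] + str(obj) + \
--                 expression[i + 1:]
--             i -= len(s) + 1
--             s = ""
--         i += 1
--     return expression
-- ===== SOURCE B (Python) =====
-- def changer_names(expression, inventory):
--     """Replaces names with numbers"""
--     out = []
--     rest = expression
--     while True:
--         j = rest.find('"')
--         if j == -1:
--             return ''.join(out) + rest
--         head, tail = rest[:j], rest[j + 1:]
--         k = tail.find('"')
--         if k == -1:
--             return ''.join(out) + rest
--         out.append(head)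
--         out.append(str(_find_object(tail[:k], inventory)))
--         rest = tail[k + 1:]
--
--
-- def _find_object(name, inventory):
--     for key in ("Visible", "Not visible", "Always visible"):
--         value = inventory[key].get(name)
--         if value is not None:
--             return value
--     raise Exception(name + 'does not exist')
-- ===== Notes on version B (the rewrite author's own statement) =====
-- stated objective: simpler
-- what changed: B replaces A's character-by-character state machine that splices replacements into the expression in place and rewinds/re-scans the spliced text with a plain loop that jumps between quote pairs via str.find, resolves each quoted name once and appends the pieces to an output list joined at the end.
import Mathlib
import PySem

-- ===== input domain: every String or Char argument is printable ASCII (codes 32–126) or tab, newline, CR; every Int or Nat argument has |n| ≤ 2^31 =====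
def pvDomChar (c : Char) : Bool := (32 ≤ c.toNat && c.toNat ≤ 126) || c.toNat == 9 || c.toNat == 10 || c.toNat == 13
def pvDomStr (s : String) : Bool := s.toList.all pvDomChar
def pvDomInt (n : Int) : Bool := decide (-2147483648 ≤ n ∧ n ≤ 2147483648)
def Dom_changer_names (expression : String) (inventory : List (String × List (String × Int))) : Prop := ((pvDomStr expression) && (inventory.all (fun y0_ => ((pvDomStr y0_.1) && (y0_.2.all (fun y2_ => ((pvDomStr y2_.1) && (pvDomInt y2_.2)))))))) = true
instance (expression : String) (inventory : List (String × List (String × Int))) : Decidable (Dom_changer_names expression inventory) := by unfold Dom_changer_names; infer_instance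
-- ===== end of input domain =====

-- B replaces A's in-place splice-and-rescan character state machine with a find-the-next-quote-pair
-- loop that appends the pieces to an output list (objective: simpler).  Return-value equivalence only;
-- neither program mutates its arguments.

-- ===== PORT A =====

-- fuel bound computed from the input's shape (totality plumbing only; proved sufficient below):
-- every spliced-in str(int) has length ≤ the sum of all rendered value lengths in the inventory.
def pvTotalLen (inventory : List (String × List (String × Int))) : Nat :=
  (inventory.map (fun p => (p.2.map (fun q => (PySem.Int.toChars q.2).length)).sum)).sum

mutual
  def pvCostF (T : Nat) : List Char → Nat
    | [] => 1
    | c :: r => 1 + (if c = '"' then pvCostN T r else pvCostF T r)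
  def pvCostN (T : Nat) : List Char → Nat
    | [] => 1
    | c :: r => if c = '"' then 1 + T + pvCostF T r else 1 + pvCostN T r
end

-- literal transliteration of A's while-loop: state (expression, i, s); fuel only makes it total
def chALoop (inv : List (String × List (String × Int))) :
    Nat → List Char → Int → List Char → List Char
  | 0, e, _, _ => e      -- fuel exhausted: never happens from the entry call (proved below)
  | fuel+1, e, i, s =>
    if i < (e.length : Int) then
      match PySem.List.pyGet? e i with
      | none => e        -- IndexError: unreachable from the entry call (i starts at 0)
      | some c =>
        if (c == '"' && s.isEmpty) || (!s.isEmpty && c != '"') then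
          chALoop inv fuel e (i + 1) (s ++ [c])
        else if c == '"' && !s.isEmpty then
          let s' := PySem.List.slice s (some 1) none       -- s = s[1:]
          let splice := fun (v : Int) =>                    -- the replacement + index rewind
            chALoop inv fuel
              (PySem.List.slice e none (some (i - (s'.length : Int) - 1)) ++
                PySem.Int.toChars v ++ PySem.List.slice e (some (i + 1)) none)
              (i - (s'.length : Int)) []
          match (PySem.Dict.ofList inv).get? "Visible" with
          | none => e    -- Python raises KeyError here; excluded by Pre_
          | some dV =>
            match (PySem.Dict.ofList dV).get? (String.ofList s') with
            | some v => splice v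
            | none =>
              match (PySem.Dict.ofList inv).get? "Not visible" with
              | none => e    -- KeyError; excluded by Pre_
              | some dN =>
                match (PySem.Dict.ofList dN).get? (String.ofList s') with
                | some v => splice v
                | none =>
                  match (PySem.Dict.ofList inv).get? "Always visible" with
                  | none => e    -- KeyError; excluded by Pre_
                  | some dA =>
                    match (PySem.Dict.ofList dA).get? (String.ofList s') with
                    | some v => splice v
                    | none => e  -- Python raises Exception(s + 'does not exist'); excluded by Pre_
        else chALoop inv fuel e (i + 1) s
    else e

def changer_names (expression : String) (inventory : List (String × List (String × Int))) : String :=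
  String.ofList (chALoop inventory (pvCostF (pvTotalLen inventory) expression.toList)
    expression.toList 0 [])

-- ===== PORT B =====

-- B's helper _find_object: try the three sections in order
def findObjB (inv : List (String × List (String × Int))) (name : String) :
    List String → Option Int
  | [] => none           -- Python raises Exception(name + 'does not exist'); excluded by Pre_
  | key :: keys =>
    match (PySem.Dict.ofList inv).get? key with
    | none => none       -- Python raises KeyError; excluded by Pre_
    | some d =>
      match (PySem.Dict.ofList d).get? name with
      | some v => some v
      | none => findObjB inv name keys

-- termination facts for B's loop (cited by the definition below)
theorem pvFindQuote_nonneg {l : List Char} (h : ¬ PySem.Chars.find l ['"'] = -1) :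
    0 ≤ PySem.Chars.find l ['"'] := by
  have := PySem.Chars.neg_one_le_find l ['"']
  omega

theorem pvDropLe (l : List Char) (a : Int) (h : 0 ≤ a) :
    (PySem.List.slice l (some a) none).length ≤ l.length := by
  rw [PySem.List.slice_from l h]
  simp

theorem pvDropQuote_lt {l : List Char} (h : ¬ PySem.Chars.find l ['"'] = -1) :
    (PySem.List.slice l (some (PySem.Chars.find l ['"'] + 1)) none).length < l.length := by
  have h0 := pvFindQuote_nonneg h
  have hne : l ≠ [] := by
    have hin : (['"'] : List Char) <:+: l := (PySem.Chars.find_nonneg_iff _ _).1 h0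
    intro he
    subst he
    simpa using hin.length_le
  rw [PySem.List.slice_from l (by omega)]
  have h1 : 1 ≤ (PySem.Chars.find l ['"'] + 1).toNat := by omega
  have h2 : l.length ≠ 0 := fun he => hne (List.eq_nil_of_length_eq_zero he)
  simp only [List.length_drop]
  omega

-- B's while-loop: state (out, rest)
def chBLoop (inv : List (String × List (String × Int)))
    (out : List (List Char)) (rest : List Char) : List Char :=
  let j := PySem.Chars.find rest ['"']
  if hj : j = -1 then PySem.Chars.join [] out ++ rest
  else
    let tail := PySem.List.slice rest (some (j + 1)) none
    let k := PySem.Chars.find tail ['"']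
    if hk : k = -1 then PySem.Chars.join [] out ++ rest
    else
      match findObjB inv (String.ofList (PySem.List.slice tail none (some k)))
          ["Visible", "Not visible", "Always visible"] with
      | none => []       -- Python raises; excluded by Pre_
      | some v =>
        chBLoop inv
          (out ++ [PySem.List.slice rest none (some j), PySem.Int.toChars v])
          (PySem.List.slice tail (some (k + 1)) none)
termination_by rest.length
decreasing_by
  exact lt_of_le_of_lt (pvDropLe _ _ (add_nonneg (pvFindQuote_nonneg hk) zero_le_one)) (pvDropQuote_lt hj)

def changer_names_alt (expression : String) (inventory : List (String × List (String × Int))) :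
    String :=
  String.ofList (chBLoop inventory [] expression.toList)

-- ===== PRECONDITION & SPEC =====

-- the quoted names of the expression, read left to right (namesIn scans inside a quote)
mutual
  def namesOf : List Char → List (List Char)
    | [] => []
    | c :: r => if c = '"' then namesIn [] r else namesOf r
  def namesIn (acc : List Char) : List Char → List (List Char)
    | [] => []
    | c :: r => if c = '"' then acc :: namesOf r else namesIn (acc ++ [c]) r
end

-- the lookup chain both programs perform on one quoted name (none ⇒ the Python raises)
def resolveName (inv : List (String × List (String × Int))) (n : List Char) : Option Int :=
  match (PySem.Dict.ofList inv).get? "Visible" with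
  | none => none
  | some dV =>
    match (PySem.Dict.ofList dV).get? (String.ofList n) with
    | some v => some v
    | none =>
      match (PySem.Dict.ofList inv).get? "Not visible" with
      | none => none
      | some dN =>
        match (PySem.Dict.ofList dN).get? (String.ofList n) with
        | some v => some v
        | none =>
          match (PySem.Dict.ofList inv).get? "Always visible" with
          | none => none
          | some dA => (PySem.Dict.ofList dA).get? (String.ofList n)

-- Pre_: exactly the inputs on which A returns normally — every quoted name of the
-- expression is found by the Visible / Not visible / Always visible lookup chain
-- (otherwise A raises KeyError or Exception).
def Pre_changer_names (expression : String) (inventory : List (String × List (String × Int))) : Prop :=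
  ∀ n ∈ namesOf expression.toList, (resolveName inventory n).isSome = true

instance (expression : String) (inventory : List (String × List (String × Int))) :
    Decidable (Pre_changer_names expression inventory) := by
  unfold Pre_changer_names; infer_instance

def pvWitness_changer_names : String × (List (String × List (String × Int))) :=
  ("take \"sword\" and \"key\"!",
   [("Visible", [("sword", 3)]), ("Not visible", [("key", 721)]), ("Always visible", [])])

def Spec_changer_names (expression : String) (inventory : List (String × List (String × Int)))
    (out : String) : Prop := out = changer_names_alt expression inventory
instance (expression : String) (inventory : List (String × List (String × Int))) (out : String) :
    Decidable (Spec_changer_names expression inventory out) := by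
  unfold Spec_changer_names; infer_instance

-- ===== CLAIM (what is proved, stated in full; the proofs are below) =====
def Claim_equal_changer_names : Prop := ∀ (expression : String) (inventory : List (String × List (String × Int))), Dom_changer_names expression inventory → Pre_changer_names expression inventory → Spec_changer_names expression inventory (changer_names expression inventory)

-- ===== LEMMAS AND PROOFS =====

-- the common reference computation: what both programs do, written structurally
mutual
  def specF (inv : List (String × List (String × Int))) : List Char → List Char
    | [] => []
    | c :: r => if c = '"' then specN inv [] r else c :: specF inv r
  def specN (inv : List (String × List (String × Int))) (acc : List Char) :
      List Char → List Char
    | [] => '"' :: acc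
    | c :: r =>
      if c = '"' then
        match resolveName inv acc with
        | none => []                                -- unreachable under Pre_
        | some v => PySem.Int.toChars v ++ specF inv r
      else specN inv (acc ++ [c]) r
end


-- ---------- generic helpers ----------

theorem pv_join_nil_flatten (l : List (List Char)) : PySem.Chars.join [] l = l.flatten := by
  simp only [PySem.Chars.join, List.intercalate]
  induction l with
  | nil => rfl
  | cons a t ih =>
    cases t with
    | nil => rfl
    | cons b t2 =>
      have hstep : List.intersperse ([] : List Char) (a :: b :: t2) =
          a :: [] :: List.intersperse [] (b :: t2) := rfl
      rw [hstep]
      simp only [List.flatten_cons] at ih ⊢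
      rw [ih]
      simp

theorem pv_quote_split {l : List Char} (h : '"' ∈ l) :
    ∃ x y, l = x ++ '"' :: y ∧ '"' ∉ x := by
  induction l with
  | nil => cases h
  | cons c r ih =>
    by_cases hc : c = '"'
    · exact ⟨[], r, by simp [hc], by simp⟩
    · have hr : '"' ∈ r := by
        rcases List.mem_cons.1 h with h' | h'
        · exact absurd h'.symm hc
        · exact h'
      obtain ⟨x, y, hxy, hx⟩ := ih hr
      refine ⟨c :: x, y, by simp [hxy], ?_⟩
      simp only [List.mem_cons]
      rintro (he | he)
      · exact hc he.symm
      · exact hx he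

theorem pv_find_quote_neg {x : List Char} (hx : '"' ∉ x) :
    PySem.Chars.find x ['"'] = -1 := by
  rw [PySem.Chars.find_eq_neg_one_iff]
  rintro ⟨s, t, hst⟩
  exact hx (by rw [← hst]; simp)

theorem pv_find_eq (x y : List Char) (hx : '"' ∉ x) :
    PySem.Chars.find (x ++ '"' :: y) ['"'] = (x.length : Int) := by
  have hin : (['"'] : List Char) <:+: (x ++ '"' :: y) := ⟨x, y, by simp⟩
  have h0 : 0 ≤ PySem.Chars.find (x ++ '"' :: y) ['"'] :=
    (PySem.Chars.find_nonneg_iff _ _).2 hin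
  obtain ⟨hpre, hmin⟩ := PySem.Chars.find_spec h0
  have hle : (PySem.Chars.find (x ++ '"' :: y) ['"']).toNat ≤ x.length := by
    by_contra hgt
    push_neg at hgt
    exact hmin x.length hgt ⟨y, by simp [List.drop_left]⟩
  have hnot : ¬ (PySem.Chars.find (x ++ '"' :: y) ['"']).toNat < x.length := by
    intro hlt
    obtain ⟨t, ht⟩ := hpre
    rw [List.drop_append_of_le_length (le_of_lt hlt)] at ht
    cases hd : x.drop (PySem.Chars.find (x ++ '"' :: y) ['"']).toNat with
    | nil =>
      have := congrArg List.length hd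
      simp [List.length_drop] at this
      omega
    | cons c w =>
      rw [hd] at ht
      have hc : c = '"' := by
        rw [List.singleton_append] at ht
        injection ht with h1 h2
        exact h1.symm
      apply hx
      rw [← hc]
      exact List.mem_of_mem_drop (hd ▸ List.mem_cons_self)
  omega

-- ---------- str(int) facts ----------

theorem pv_digitChar_ne {m : Nat} (h : m < 10) : Nat.digitChar m ≠ '"' := by
  rcases m with _|_|_|_|_|_|_|_|_|_|m <;> first | decide | omega

theorem pv_toDigitsCore_eq_nil {b : Nat} :
    ∀ f n (acc : List Char), Nat.toDigitsCore b f n acc = [] → f = 0 ∧ acc = [] := by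
  intro f
  induction f with
  | zero => intro n acc h; exact ⟨rfl, h⟩
  | succ f ih =>
    intro n acc h
    unfold Nat.toDigitsCore at h
    simp only [] at h
    split at h
    · simp at h
    · have := ih _ _ h
      simp at this

theorem pv_toDigitsCore_mem {f n : Nat} {acc : List Char} {c : Char}
    (h : c ∈ Nat.toDigitsCore 10 f n acc) : c ∈ acc ∨ ∃ m, m < 10 ∧ c = Nat.digitChar m := by
  induction f generalizing n acc with
  | zero => exact Or.inl h
  | succ f ih =>
    unfold Nat.toDigitsCore at h
    simp only [] at h
    split at h
    · rcases List.mem_cons.1 h with h' | h'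
      · exact Or.inr ⟨n % 10, Nat.mod_lt _ (by omega), h'⟩
      · exact Or.inl h'
    · rcases ih h with h' | h'
      · rcases List.mem_cons.1 h' with h'' | h''
        · exact Or.inr ⟨n % 10, Nat.mod_lt _ (by omega), h''⟩
        · exact Or.inl h''
      · exact Or.inr h'

theorem pv_toChars_ne_nil (v : Int) : PySem.Int.toChars v ≠ [] := by
  unfold PySem.Int.toChars
  split
  · simp
  · intro h
    have := pv_toDigitsCore_eq_nil _ _ _ h
    omega

theorem pv_toChars_no_quote (v : Int) : '"' ∉ PySem.Int.toChars v := by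
  unfold PySem.Int.toChars
  intro h
  have hdig : ∀ m, '"' ∈ Nat.toDigits 10 m → False := by
    intro m hm
    unfold Nat.toDigits at hm
    rcases pv_toDigitsCore_mem hm with h' | ⟨k, hk, he⟩
    · cases h'
    · exact pv_digitChar_ne hk he.symm
  split at h
  · rcases List.mem_cons.1 h with h' | h'
    · cases h'
    · exact hdig _ h'
  · exact hdig _ h

-- ---------- inventory value size bound ----------

theorem pv_values_ofList {κ ν : Type} [BEq κ] [LawfulBEq κ]
    (l : List (κ × ν)) (k : κ) (x : ν)
    (h : (PySem.Dict.ofList l).get? k = some x) : x ∈ l.map Prod.snd := by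
  have h1 : (k, x) ∈ (PySem.Dict.ofList l).items := PySem.Dict.mem_items_of_get?_eq_some _ h
  have h2 : x ∈ (PySem.Dict.ofList l).values := by
    simp only [PySem.Dict.values]
    exact List.mem_map.2 ⟨(k, x), h1, rfl⟩
  have key : ∀ (m : List (κ × ν)) (d : PySem.Dict κ ν) (x : ν),
      x ∈ (m.foldl (fun acc p => acc.insert p.1 p.2) d).values →
      x ∈ d.values ∨ x ∈ m.map Prod.snd := by
    intro m
    induction m with
    | nil => intro d x hx; exact Or.inl hx
    | cons p t ih =>
      intro d x hx
      rcases ih _ _ hx with h' | h'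
      · rcases PySem.Dict.mem_values_insert _ _ _ _ h' with h'' | h''
        · right; simp [h'']
        · left; exact h''
      · right; simp [h']
  have h3 := key l PySem.Dict.empty x (by
    unfold PySem.Dict.ofList PySem.Dict.update at h2
    exact h2)
  rcases h3 with h' | h'
  · simp [PySem.Dict.empty, PySem.Dict.values] at h'
  · exact h'

theorem pv_resolve_le (inv : List (String × List (String × Int))) (n : List Char) (v : Int)
    (h : resolveName inv n = some v) :
    (PySem.Int.toChars v).length ≤ pvTotalLen inv := by
  have main : ∀ (dname : String) (d : List (String × Int)),
      (PySem.Dict.ofList inv).get? dname = some d →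
      (PySem.Dict.ofList d).get? (String.ofList n) = some v →
      (PySem.Int.toChars v).length ≤ pvTotalLen inv := by
    intro dname d hd hv
    have hdmem : d ∈ inv.map Prod.snd := pv_values_ofList _ _ _ hd
    have hvmem : v ∈ d.map Prod.snd := pv_values_ofList _ _ _ hv
    obtain ⟨q, hq, hq2⟩ := List.mem_map.1 hvmem
    have h1 : (PySem.Int.toChars v).length ≤ (d.map (fun q => (PySem.Int.toChars q.2).length)).sum := by
      refine List.single_le_sum (fun x _ => Nat.zero_le _) _ ?_
      exact List.mem_map.2 ⟨q, hq, by rw [hq2]⟩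
    have h2 : (d.map (fun q => (PySem.Int.toChars q.2).length)).sum ≤ pvTotalLen inv := by
      obtain ⟨p, hp, hpd⟩ := List.mem_map.1 hdmem
      unfold pvTotalLen
      refine List.single_le_sum (fun x _ => Nat.zero_le _) _ ?_
      exact List.mem_map.2 ⟨p, hp, by rw [hpd]⟩
    omega
  unfold resolveName at h
  rcases e1 : (PySem.Dict.ofList inv).get? "Visible" with _ | dV
  · rw [e1] at h
    simp only [] at h
    cases h
  rw [e1] at h
  simp only [] at h
  rcases e2 : (PySem.Dict.ofList dV).get? (String.ofList n) with _ | v1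
  · rw [e2] at h
    simp only [] at h
    rcases e3 : (PySem.Dict.ofList inv).get? "Not visible" with _ | dN
    · rw [e3] at h
      simp only [] at h
      cases h
    rw [e3] at h
    simp only [] at h
    rcases e4 : (PySem.Dict.ofList dN).get? (String.ofList n) with _ | v2
    · rw [e4] at h
      simp only [] at h
      rcases e5 : (PySem.Dict.ofList inv).get? "Always visible" with _ | dA
      · rw [e5] at h
        simp only [] at h
        cases h
      rw [e5] at h
      simp only [] at h
      exact main _ _ e5 h
    · rw [e4] at h
      simp only [] at h
      cases h
      exact main _ _ e3 e4
  · rw [e2] at h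
    simp only [] at h
    cases h
    exact main _ _ e1 e2

-- ---------- cost function facts ----------

theorem pvCostF_pos (T : Nat) (l : List Char) : 1 ≤ pvCostF T l := by
  cases l with
  | nil => simp [pvCostF]
  | cons c r => simp only [pvCostF]; omega

theorem pvCostN_pos (T : Nat) (l : List Char) : 1 ≤ pvCostN T l := by
  cases l with
  | nil => simp [pvCostN]
  | cons c r => simp only [pvCostN]; split <;> omega

theorem pvCostF_qfree (T : Nat) {x : List Char} (hx : '"' ∉ x) (r : List Char) :
    pvCostF T (x ++ r) = x.length + pvCostF T r := by
  induction x with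
  | nil => simp
  | cons c t ih =>
    have hc : ¬ c = '"' := fun he => hx (by simp [he])
    have ht : '"' ∉ t := fun he => hx (by simp [he])
    simp only [List.cons_append, pvCostF, if_neg hc, ih ht, List.length_cons]
    omega

-- ---------- namesOf / specF structure facts ----------

theorem namesOf_qfree {x : List Char} (hx : '"' ∉ x) (r : List Char) :
    namesOf (x ++ r) = namesOf r := by
  induction x with
  | nil => rfl
  | cons c t ih =>
    have hc : ¬ c = '"' := fun he => hx (by simp [he])
    have ht : '"' ∉ t := fun he => hx (by simp [he])
    simp [namesOf, if_neg hc, ih ht]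

theorem namesIn_close {n : List Char} (hn : '"' ∉ n) (z : List Char) :
    ∀ acc, namesIn acc (n ++ '"' :: z) = (acc ++ n) :: namesOf z := by
  induction n with
  | nil => intro acc; simp [namesIn]
  | cons c t ih =>
    intro acc
    have hc : ¬ c = '"' := fun he => hn (by simp [he])
    have ht : '"' ∉ t := fun he => hn (by simp [he])
    simp [namesIn, if_neg hc, ih ht]

theorem specF_qfree (inv : List (String × List (String × Int))) {x : List Char}
    (hx : '"' ∉ x) (r : List Char) : specF inv (x ++ r) = x ++ specF inv r := by
  induction x with
  | nil => rfl
  | cons c t ih =>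
    have hc : ¬ c = '"' := fun he => hx (by simp [he])
    have ht : '"' ∉ t := fun he => hx (by simp [he])
    simp [specF, if_neg hc, ih ht]

theorem specN_qfree (inv : List (String × List (String × Int))) {y : List Char}
    (hy : '"' ∉ y) : ∀ acc, specN inv acc y = '"' :: (acc ++ y) := by
  induction y with
  | nil => intro acc; simp [specN]
  | cons c t ih =>
    intro acc
    have hc : ¬ c = '"' := fun he => hy (by simp [he])
    have ht : '"' ∉ t := fun he => hy (by simp [he])
    simp [specN, if_neg hc, ih ht]

theorem specN_close (inv : List (String × List (String × Int))) {n : List Char}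
    (hn : '"' ∉ n) (z : List Char) :
    ∀ acc, specN inv acc (n ++ '"' :: z) =
      (match resolveName inv (acc ++ n) with
       | none => []
       | some v => PySem.Int.toChars v ++ specF inv z) := by
  induction n with
  | nil => intro acc; simp [specN]
  | cons c t ih =>
    intro acc
    have hc : ¬ c = '"' := fun he => hn (by simp [he])
    have ht : '"' ∉ t := fun he => hn (by simp [he])
    simp only [List.cons_append, specN, if_neg hc, ih ht]
    simp

-- ---------- B loop equations and main lemma ----------

theorem chBLoop_stop (inv : List (String × List (String × Int))) (out : List (List Char))
    {cs : List Char} (h : PySem.Chars.find cs ['"'] = -1) :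
    chBLoop inv out cs = PySem.Chars.join [] out ++ cs := by
  rw [chBLoop]
  simp [h]

theorem chBLoop_stop2 (inv : List (String × List (String × Int))) (out : List (List Char))
    {cs : List Char} (h : ¬ PySem.Chars.find cs ['"'] = -1)
    (h2 : PySem.Chars.find (PySem.List.slice cs (some (PySem.Chars.find cs ['"'] + 1))) ['"'] = -1) :
    chBLoop inv out cs = PySem.Chars.join [] out ++ cs := by
  rw [chBLoop]
  simp [h, h2]

theorem chBLoop_step (inv : List (String × List (String × Int))) (out : List (List Char))
    {cs : List Char} {v : Int} (h : ¬ PySem.Chars.find cs ['"'] = -1)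
    (h2 : ¬ PySem.Chars.find (PySem.List.slice cs (some (PySem.Chars.find cs ['"'] + 1))) ['"'] = -1)
    (h3 : findObjB inv (String.ofList (PySem.List.slice
            (PySem.List.slice cs (some (PySem.Chars.find cs ['"'] + 1))) none
            (some (PySem.Chars.find (PySem.List.slice cs (some (PySem.Chars.find cs ['"'] + 1))) ['"']))))
          ["Visible", "Not visible", "Always visible"] = some v) :
    chBLoop inv out cs = chBLoop inv
      (out ++ [PySem.List.slice cs none (some (PySem.Chars.find cs ['"'])), PySem.Int.toChars v])
      (PySem.List.slice (PySem.List.slice cs (some (PySem.Chars.find cs ['"'] + 1)))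
        (some (PySem.Chars.find (PySem.List.slice cs (some (PySem.Chars.find cs ['"'] + 1))) ['"'] + 1))) := by
  rw [chBLoop]
  simp [h, h2, h3]

theorem pv_findObjB_eq (inv : List (String × List (String × Int))) (n : List Char) :
    findObjB inv (String.ofList n) ["Visible", "Not visible", "Always visible"] =
      resolveName inv n := by
  simp only [findObjB, resolveName]
  rcases (PySem.Dict.ofList inv).get? "Visible" with _ | dV
  · rfl
  simp only []
  rcases (PySem.Dict.ofList dV).get? (String.ofList n) with _ | v1
  · simp only []
    rcases (PySem.Dict.ofList inv).get? "Not visible" with _ | dN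
    · rfl
    simp only []
    rcases (PySem.Dict.ofList dN).get? (String.ofList n) with _ | v2
    · simp only []
      rcases (PySem.Dict.ofList inv).get? "Always visible" with _ | dA
      · rfl
      simp only []
      rcases (PySem.Dict.ofList dA).get? (String.ofList n) with _ | v3 <;> rfl
    · rfl
  · rfl

theorem pv_drop_after_quote (x y : List Char) :
    PySem.List.slice (x ++ '"' :: y) (some ((x.length : Int) + 1)) = y := by
  have h1 : ((x.length : Int) + 1) = ((x.length + 1 : Nat) : Int) := by push_cast; ring
  rw [h1, PySem.List.slice_from_natCast]
  rw [show x ++ '"' :: y = (x ++ ['"']) ++ y by simp,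
      show x.length + 1 = (x ++ ['"']).length by simp]
  exact List.drop_left

theorem chB_main (inv : List (String × List (String × Int))) :
    ∀ (N : Nat) (cs : List Char), cs.length ≤ N →
      (∀ n ∈ namesOf cs, (resolveName inv n).isSome = true) →
      ∀ out, chBLoop inv out cs = PySem.Chars.join [] out ++ specF inv cs := by
  intro N
  induction N with
  | zero =>
    intro cs hlen h out
    have : cs = [] := List.eq_nil_of_length_eq_zero (by omega)
    subst this
    rw [chBLoop_stop inv out (pv_find_quote_neg (by simp))]
    rfl
  | succ N ih =>
    intro cs hlen h out
    by_cases hq : '"' ∈ cs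
    · obtain ⟨x, y, rfl, hx⟩ := pv_quote_split hq
      have hfx : PySem.Chars.find (x ++ '"' :: y) ['"'] = (x.length : Int) := pv_find_eq x y hx
      have htail : PySem.List.slice (x ++ '"' :: y) (some (PySem.Chars.find (x ++ '"' :: y) ['"'] + 1)) = y := by
        rw [hfx]; exact pv_drop_after_quote x y
      by_cases hqy : '"' ∈ y
      · obtain ⟨n, z, rfl, hn⟩ := pv_quote_split hqy
        have hfy : PySem.Chars.find (n ++ '"' :: z) ['"'] = (n.length : Int) := pv_find_eq n z hn
        have hname : PySem.List.slice (n ++ '"' :: z) none (some (n.length : Int)) = n := by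
          rw [PySem.List.slice_to_natCast]
          exact List.take_left
        have hnames : namesOf (x ++ '"' :: (n ++ '"' :: z)) = n :: namesOf z := by
          rw [namesOf_qfree hx]
          show namesIn [] (n ++ '"' :: z) = n :: namesOf z
          simpa using namesIn_close hn z []
        have hres : ∃ v, resolveName inv n = some v := by
          have := h n (by rw [hnames]; simp)
          exact Option.isSome_iff_exists.1 this
        obtain ⟨v, hv⟩ := hres
        rw [chBLoop_step inv out (by rw [hfx]; omega)
          (by rw [htail, hfy]; omega)
          (by rw [htail, hfy, hname, pv_findObjB_eq]; exact hv)]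
        rw [htail, hfy, hfx, pv_drop_after_quote n z,
          show PySem.List.slice (x ++ '"' :: (n ++ '"' :: z)) none (some (x.length : Int)) = x by
            rw [PySem.List.slice_to_natCast]; exact List.take_left]
        rw [ih z (by simp at hlen; omega) (by intro m hm; exact h m (by rw [hnames]; simp [hm])) _]
        rw [specF_qfree inv hx]
        have hspecN : specF inv ('"' :: (n ++ '"' :: z)) = PySem.Int.toChars v ++ specF inv z := by
          show specN inv [] (n ++ '"' :: z) = _
          rw [specN_close inv hn z []]
          simp [hv]
        rw [hspecN, pv_join_nil_flatten, pv_join_nil_flatten]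
        simp
      · have hfy : PySem.Chars.find y ['"'] = -1 := pv_find_quote_neg hqy
        rw [chBLoop_stop2 inv out (by rw [hfx]; omega) (by rw [htail]; exact hfy)]
        rw [specF_qfree inv hx,
          show specF inv ('"' :: y) = specN inv [] y from rfl,
          specN_qfree inv hqy []]
        simp
    · rw [chBLoop_stop inv out (pv_find_quote_neg hq)]
      have h1 : specF inv cs = cs := by
        simpa [specF] using specF_qfree inv hq []
      rw [h1]

-- ---------- A loop equations and main lemma ----------

theorem chALoop_stop (inv : List (String × List (String × Int))) (fuel : Nat)
    {e : List Char} {i : Int} {s : List Char} (h : ¬ i < (e.length : Int)) :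
    chALoop inv (fuel + 1) e i s = e := by
  rw [chALoop]
  simp [h]

theorem chALoop_take (inv : List (String × List (String × Int))) (fuel : Nat)
    {e : List Char} {i : Int} {s : List Char} {c : Char} (h : i < (e.length : Int))
    (hg : PySem.List.pyGet? e i = some c)
    (hb : ((c == '"' && s.isEmpty) || (!s.isEmpty && c != '"')) = true) :
    chALoop inv (fuel + 1) e i s = chALoop inv fuel e (i + 1) (s ++ [c]) := by
  rw [chALoop]
  simp [h, hg, hb]

theorem chALoop_skip (inv : List (String × List (String × Int))) (fuel : Nat)
    {e : List Char} {i : Int} {s : List Char} {c : Char} (h : i < (e.length : Int))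
    (hg : PySem.List.pyGet? e i = some c)
    (hb : ((c == '"' && s.isEmpty) || (!s.isEmpty && c != '"')) = false)
    (hb2 : (c == '"' && !s.isEmpty) = false) :
    chALoop inv (fuel + 1) e i s = chALoop inv fuel e (i + 1) s := by
  rw [chALoop]
  simp [h, hg, hb, hb2]

theorem chALoop_close (inv : List (String × List (String × Int))) (fuel : Nat)
    {e : List Char} {i : Int} {s : List Char} {c : Char} (h : i < (e.length : Int))
    (hg : PySem.List.pyGet? e i = some c)
    (hb : ((c == '"' && s.isEmpty) || (!s.isEmpty && c != '"')) = false)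
    (hb2 : (c == '"' && !s.isEmpty) = true) :
    chALoop inv (fuel + 1) e i s =
      (match resolveName inv (PySem.List.slice s (some 1)) with
       | none => e
       | some v => chALoop inv fuel
          (PySem.List.slice e none (some (i - ((PySem.List.slice s (some 1)).length : Int) - 1)) ++
            PySem.Int.toChars v ++ PySem.List.slice e (some (i + 1)))
          (i - ((PySem.List.slice s (some 1)).length : Int)) []) := by
  rw [chALoop]
  simp only [h, if_true, hg, hb, hb2, if_false, Bool.false_eq_true, if_pos]
  unfold resolveName
  rcases (PySem.Dict.ofList inv).get? "Visible" with _ | dV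
  · rfl
  simp only []
  rcases (PySem.Dict.ofList dV).get? (String.ofList (PySem.List.slice s (some 1))) with _ | v1
  swap
  · rfl
  simp only []
  rcases (PySem.Dict.ofList inv).get? "Not visible" with _ | dN
  · rfl
  simp only []
  rcases (PySem.Dict.ofList dN).get? (String.ofList (PySem.List.slice s (some 1))) with _ | v2
  swap
  · rfl
  simp only []
  rcases (PySem.Dict.ofList inv).get? "Always visible" with _ | dA
  · rfl
  simp only []
  rcases (PySem.Dict.ofList dA).get? (String.ofList (PySem.List.slice s (some 1))) with _ | v3 <;> rfl

theorem chA_main (inv : List (String × List (String × Int))) :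
    ∀ fuel : Nat,
      (∀ done rest, (∀ n ∈ namesOf rest, (resolveName inv n).isSome = true) →
        pvCostF (pvTotalLen inv) rest ≤ fuel →
        chALoop inv fuel (done ++ rest) ((done.length : Nat) : Int) [] = done ++ specF inv rest)
      ∧ (∀ done name rest, '"' ∉ name →
        (∀ n ∈ namesIn name rest, (resolveName inv n).isSome = true) →
        pvCostN (pvTotalLen inv) rest ≤ fuel →
        chALoop inv fuel (done ++ '"' :: (name ++ rest)) (((done.length + name.length + 1 : Nat)) : Int) ('"' :: name) = done ++ specN inv name rest) := by
  intro fuel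
  induction fuel with
  | zero =>
    constructor
    · intro done rest _ hcost
      have := pvCostF_pos (pvTotalLen inv) rest
      omega
    · intro done name rest _ _ hcost
      have := pvCostN_pos (pvTotalLen inv) rest
      omega
  | succ fuel ih =>
    constructor
    · -- scanning with s = []
      intro done rest H hcost
      cases rest with
      | nil =>
        rw [chALoop_stop inv fuel (by simp)]
        simp [specF]
      | cons c r =>
        have hg : PySem.List.pyGet? (done ++ c :: r) ((done.length : Nat) : Int) = some c :=
          PySem.List.pyGet?_append_length done r c
        have hlt : ((done.length : Nat) : Int) < (((done ++ c :: r).length : Nat) : Int) := by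
          simp [List.length_append]
        by_cases hc : c = '"'
        · subst hc
          rw [chALoop_take inv fuel hlt hg (by simp)]
          have h2 := (ih.2) done [] r (by simp)
            (by
              intro n hn
              exact H n (by simpa [namesOf] using hn))
            (by
              have : pvCostF (pvTotalLen inv) ('"' :: r) = 1 + pvCostN (pvTotalLen inv) r := by
                simp [pvCostF]
              omega)
          simp only [List.nil_append, List.length_nil, Nat.add_zero] at h2
          have harg : ((done.length : Nat) : Int) + 1 = ((done.length + 1 : Nat) : Int) := by push_cast; ring
          rw [harg]
          simp only [List.nil_append]
          rw [h2]
          simp [specF]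
        · rw [chALoop_skip inv fuel hlt hg (by simp [hc]) (by simp)]
          have h1 := (ih.1) (done ++ [c]) r
            (by intro n hn; exact H n (by simpa [namesOf, hc] using hn))
            (by
              have : pvCostF (pvTotalLen inv) (c :: r) = 1 + pvCostF (pvTotalLen inv) r := by
                simp [pvCostF, hc]
              omega)
          have harg : ((done.length : Nat) : Int) + 1 = (((done ++ [c]).length : Nat) : Int) := by
            simp [List.length_append]
          rw [harg, show (done ++ c :: r : List Char) = (done ++ [c]) ++ r by simp, h1]
          simp [specF, hc]
    · -- scanning inside a quote, s = '"' :: name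
      intro done name rest hname H hcost
      cases rest with
      | nil =>
        rw [chALoop_stop inv fuel (by simp [List.length_append]; omega)]
        simp [specN]
      | cons c r =>
        have hsplit : (done ++ '"' :: (name ++ c :: r) : List Char) = (done ++ '"' :: name) ++ c :: r := by
          simp
        have hg : PySem.List.pyGet? (done ++ '"' :: (name ++ c :: r)) ((done.length + name.length + 1 : Nat) : Int) = some c := by
          rw [hsplit, show (done.length + name.length + 1 : Nat) = (done ++ '"' :: name).length by
            simp [List.length_append]; omega]
          exact PySem.List.pyGet?_append_length _ _ _
        have hlt : (((done.length + name.length + 1 : Nat)) : Int) < (((done ++ '"' :: (name ++ c :: r)).length : Nat) : Int) := by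
          simp [List.length_append]
          omega
        by_cases hc : c = '"'
        · subst hc
          -- closing quote: replacement
          rw [chALoop_close inv fuel hlt hg (by simp) (by simp)]
          have hs' : PySem.List.slice ('"' :: name) (some 1) = name := by
            rw [PySem.List.slice_from_one]
            rfl
          have hres : ∃ v, resolveName inv name = some v := by
            refine Option.isSome_iff_exists.1 (H name ?_)
            simp [namesIn]
          obtain ⟨v, hv⟩ := hres
          rw [hs', hv]
          simp only []
          -- the spliced expression and rewound index
          have hidx1 : ((done.length + name.length + 1 : Nat) : Int) - (name.length : Int) - 1 = ((done.length : Nat) : Int) := by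
            push_cast; ring
          have hidx2 : ((done.length + name.length + 1 : Nat) : Int) - (name.length : Int) = ((done.length : Nat) : Int) + 1 := by
            push_cast; ring
          have hpre : PySem.List.slice (done ++ '"' :: (name ++ '"' :: r)) none (some ((done.length : Nat) : Int)) = done := by
            rw [PySem.List.slice_to_natCast]
            exact List.take_append_of_le_length (by omega) |>.trans (by simp)
          have hsuf : PySem.List.slice (done ++ '"' :: (name ++ '"' :: r)) (some (((done.length + name.length + 1 : Nat) : Int) + 1)) = r := by
            rw [show ((done.length + name.length + 1 : Nat) : Int) + 1 = ((done.length + name.length + 2 : Nat) : Int) by push_cast; ring,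
              PySem.List.slice_from_natCast,
              show (done ++ '"' :: (name ++ '"' :: r) : List Char) = (done ++ '"' :: name ++ ['"']) ++ r by simp,
              show done.length + name.length + 2 = (done ++ '"' :: name ++ ['"']).length by simp [List.length_append]; omega]
            exact List.drop_left
          rw [hidx1, hidx2, hpre, hsuf]
          -- t = toChars v is nonempty and quote-free; re-enter scanning state
          obtain ⟨t0, ts, ht⟩ : ∃ t0 ts, PySem.Int.toChars v = t0 :: ts := by
            rcases he : PySem.Int.toChars v with _ | ⟨t0, ts⟩
            · exact absurd he (pv_toChars_ne_nil v)
            · exact ⟨t0, ts, rfl⟩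
          have hts : '"' ∉ ts := fun hm => pv_toChars_no_quote v (by rw [ht]; simp [hm])
          have h1 := (ih.1) (done ++ [t0]) (ts ++ r)
            (by
              intro m hm
              rw [namesOf_qfree hts] at hm
              exact H m (by simp [namesIn, hm]))
            (by
              rw [pvCostF_qfree (pvTotalLen inv) hts]
              have hlen : (PySem.Int.toChars v).length ≤ pvTotalLen inv := pv_resolve_le inv name v hv
              rw [ht] at hlen
              simp at hlen
              have : pvCostN (pvTotalLen inv) ('"' :: r) = 1 + pvTotalLen inv + pvCostF (pvTotalLen inv) r := by
                simp [pvCostN]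
              omega)
          rw [ht]
          rw [show (done ++ (t0 :: ts) ++ r : List Char) = (done ++ [t0]) ++ (ts ++ r) by simp,
            show ((done.length : Nat) : Int) + 1 = (((done ++ [t0]).length : Nat) : Int) by simp [List.length_append],
            h1, specF_qfree inv hts]
          have hspec : specN inv name ('"' :: r) = PySem.Int.toChars v ++ specF inv r := by
            simp [specN, hv]
          rw [hspec, ht]
          simp
        · -- accumulate the character
          rw [chALoop_take inv fuel hlt hg (by simp [hc])]
          have h2 := (ih.2) done (name ++ [c]) r
            (by
              intro hm
              rcases List.mem_append.1 hm with h' | h'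
              · exact hname h'
              · simp at h'
                exact hc h'.symm)
            (by
              intro m hm
              refine H m ?_
              simp [namesIn, hc]
              exact hm)
            (by
              have : pvCostN (pvTotalLen inv) (c :: r) = 1 + pvCostN (pvTotalLen inv) r := by
                simp [pvCostN, hc]
              omega)
          rw [show ('"' :: name ++ [c] : List Char) = '"' :: (name ++ [c]) by simp,
            show (done ++ '"' :: (name ++ c :: r) : List Char) = done ++ '"' :: ((name ++ [c]) ++ r) by simp,
            show ((done.length + name.length + 1 : Nat) : Int) + 1 = ((done.length + (name ++ [c]).length + 1 : Nat) : Int) by simp [List.length_append]; push_cast; ring]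
          rw [h2]
          simp [specN, hc]

theorem chA_eq_specF (inv : List (String × List (String × Int))) (cs : List Char)
    (h : ∀ n ∈ namesOf cs, (resolveName inv n).isSome = true) :
    chALoop inv (pvCostF (pvTotalLen inv) cs) cs 0 [] = specF inv cs := by
  have := (chA_main inv (pvCostF (pvTotalLen inv) cs)).1 [] cs h le_rfl
  simpa using this

theorem chB_eq_specF (inv : List (String × List (String × Int))) (cs : List Char)
    (h : ∀ n ∈ namesOf cs, (resolveName inv n).isSome = true) :
    chBLoop inv [] cs = specF inv cs := by
  have := chB_main inv cs.length cs le_rfl h []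
  simpa [pv_join_nil_flatten] using this

-- ===== VERDICT (by name: the statement is the Claim_ definition above) =====
theorem changer_names_spec : Claim_equal_changer_names := by
  intro e inv _ hpre
  unfold Spec_changer_names changer_names changer_names_alt
  rw [chA_eq_specF inv e.toList hpre, chB_eq_specF inv e.toList hpre]
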